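-- pv_equiv track=rewrite | github.com/Pratikshresth/NetSec---Real_World_Project | Root_STP.py | Lower_MAC
-- ===== SOURCE A (Python) =====
-- def Lower_MAC(mac):
--     """
--     Function To Lower The Root MAC And The Bridge MAC To gain Root Role
--     :param mac:
--     :return:
--     """
--     EvilMAC = ""
--     count = 0
--     Flag = False
--     for x in range(len(mac)):
--         if mac[x] in "abcdef123456789" and not Flag:
--             count+=1
--             repl = int(mac[x], 16)
--             repl -= 1
--             repl = format(repl, "x")
--             EvilMAC = EvilMAC + str(repl)
--             if count >2:
--                 Flag=True
--         else:
--             EvilMAC+=mac[x]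
--     return  EvilMAC
-- ===== SOURCE B (Python) =====
-- def Lower_MAC(mac):
--     # Pass 1: collect indices of the first three characters in "abcdef123456789".
--     idxs = []
--     for i, ch in enumerate(mac):
--         if ch in "abcdef123456789":
--             idxs.append(i)
--             if len(idxs) == 3:
--                 break
--     # Pass 2: rebuild, decrementing only at the collected indices.
--     chars = list(mac)
--     for i in idxs:
--         chars[i] = format(int(mac[i], 16) - 1, "x")
--     return "".join(chars)
-- ===== Notes on version B (the rewrite author's own statement) =====
-- stated objective: faster
-- what changed: Replaces A's single stateful count/Flag pass that rebuilds the whole string by repeated concatenation with an index-gathering pass (first three eligible positions) followed by a targeted replacement at those indices and one join.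
import Mathlib
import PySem

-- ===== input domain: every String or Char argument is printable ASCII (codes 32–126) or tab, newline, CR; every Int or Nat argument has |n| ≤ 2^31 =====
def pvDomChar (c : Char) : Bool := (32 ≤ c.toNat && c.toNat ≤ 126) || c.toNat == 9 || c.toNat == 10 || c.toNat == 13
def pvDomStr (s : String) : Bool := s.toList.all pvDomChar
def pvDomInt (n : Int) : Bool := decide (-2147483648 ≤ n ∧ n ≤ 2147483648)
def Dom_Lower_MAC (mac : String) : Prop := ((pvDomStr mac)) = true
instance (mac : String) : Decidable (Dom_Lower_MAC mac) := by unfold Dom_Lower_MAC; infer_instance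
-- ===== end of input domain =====

-- B replaces A's single stateful count/Flag pass with an index-gathering pass
-- followed by a targeted rebuild of just those positions (alternative decomposition).

-- ===== PORT A =====
-- shared hex helpers: int(c,16) and format(n,"x"), exact on the only values that
-- occur here (c ∈ "abcdef123456789", so n ∈ 0..14: a single lowercase hex digit)
def pvHexVal (c : Char) : Int := if c.isDigit then (c.toNat : Int) - 48 else (c.toNat : Int) - 87
def pvHexChar (n : Int) : Char := if n < 10 then Char.ofNat (n.toNat + 48) else Char.ofNat (n.toNat + 87)

-- A's loop: state (EvilMAC, count, Flag), one character per step
def pvLoopA : List Char → List Char → Int → Bool → List Char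
  | [], evil, _, _ => evil
  | c :: rest, evil, count, flag =>
    if c ∈ "abcdef123456789".toList ∧ flag = false then
      let count := count + 1
      let repl := pvHexVal c - 1
      let evil := evil ++ [pvHexChar repl]
      if count > 2 then pvLoopA rest evil count true
      else pvLoopA rest evil count false
    else pvLoopA rest (evil ++ [c]) count flag

def Lower_MAC (mac : String) : String := String.mk (pvLoopA mac.toList [] 0 false)

-- ===== PORT B =====
-- pass 1 of Source B: indices of eligible chars, stopping once three are gathered
def pvCollect : List Char → Nat → Nat → List Nat
  | [], _, _ => []
  | c :: rest, i, k =>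
    if c ∈ "abcdef123456789".toList then
      if k ≤ 1 then [i] else i :: pvCollect rest (i + 1) (k - 1)
    else pvCollect rest (i + 1) k

def Lower_MAC_alt (mac : String) : String :=
  let t := mac.toList
  let idxs := pvCollect t 0 3
  -- pass 2 of Source B: chars[i] = format(int(mac[i],16)-1,"x") at each collected index
  let chars := idxs.foldl (fun out i => out.set i (pvHexChar (pvHexVal (t.getD i ' ') - 1))) t
  String.mk chars

-- ===== PRECONDITION & SPEC =====
def Spec_Lower_MAC (mac : String) (out : String) : Prop := out = Lower_MAC_alt mac
instance (mac : String) (out : String) : Decidable (Spec_Lower_MAC mac out) := by unfold Spec_Lower_MAC; infer_instance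

-- ===== CLAIM (what is proved, stated in full; the proofs are below) =====
def Claim_equal_Lower_MAC : Prop := ∀ (mac : String), Dom_Lower_MAC mac → Spec_Lower_MAC mac (Lower_MAC mac)

-- ===== LEMMAS AND PROOFS =====

-- common denotation: replace the first k eligible characters
def pvGo (k : Nat) : List Char → List Char
  | [] => []
  | c :: rest =>
    if c ∈ "abcdef123456789".toList ∧ 0 < k then
      pvHexChar (pvHexVal c - 1) :: pvGo (k - 1) rest
    else c :: pvGo k rest

theorem pvGo_zero (t : List Char) : pvGo 0 t = t := by
  induction t with
  | nil => rfl
  | cons c rest ih =>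
    rw [pvGo, if_neg (by simp), ih]

theorem pvGo_cons_pos {c : Char} (hc : c ∈ "abcdef123456789".toList) {k : Nat} (hk : 0 < k)
    (rest : List Char) : pvGo k (c :: rest) = pvHexChar (pvHexVal c - 1) :: pvGo (k - 1) rest := by
  rw [pvGo, if_pos ⟨hc, hk⟩]

theorem pvGo_cons_neg {c : Char} (hc : c ∉ "abcdef123456789".toList) (k : Nat)
    (rest : List Char) : pvGo k (c :: rest) = c :: pvGo k rest := by
  rw [pvGo, if_neg (by exact fun h => hc h.1)]

theorem pvLoopA_true (t : List Char) : ∀ evil count, pvLoopA t evil count true = evil ++ t := by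
  induction t with
  | nil => intro evil count; simp [pvLoopA]
  | cons c rest ih =>
    intro evil count
    rw [pvLoopA, if_neg (by simp), ih]
    simp

theorem pvLoopA_false (t : List Char) :
    ∀ (k : Nat) evil, 1 ≤ k → k ≤ 3 → pvLoopA t evil (3 - (k : Int)) false = evil ++ pvGo k t := by
  induction t with
  | nil => intro k evil _ _; simp [pvLoopA, pvGo]
  | cons c rest ih =>
    intro k evil hk1 hk3
    by_cases hc : c ∈ "abcdef123456789".toList
    · rw [pvLoopA, if_pos ⟨hc, rfl⟩]
      by_cases hk : k = 1
      · subst hk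
        rw [if_pos (by norm_num), pvLoopA_true,
          pvGo_cons_pos hc Nat.one_pos, pvGo_zero]
        simp
      · have hk2 : 2 ≤ k := by omega
        have hgt : ¬ ((3 : Int) - k + 1 > 2) := by
          have : (2 : Int) ≤ (k : Int) := by exact_mod_cast hk2
          omega
        rw [if_neg hgt]
        have hcast : (3 : Int) - (k : Int) + 1 = 3 - ((k - 1 : Nat) : Int) := by
          push_cast [Nat.cast_sub hk1]
          ring
        rw [hcast, ih (k - 1) _ (by omega) (by omega),
          pvGo_cons_pos hc (by omega)]
        simp
    · rw [pvLoopA, if_neg (by exact fun h => hc h.1),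
        ih k _ hk1 hk3, pvGo_cons_neg hc]
      simp

-- shifting the start index shifts every collected index
theorem pvCollect_shift (t : List Char) :
    ∀ i k, pvCollect t (i + 1) k = (pvCollect t i k).map (· + 1) := by
  induction t with
  | nil => intro i k; rfl
  | cons c rest ih =>
    intro i k
    by_cases hc : c ∈ "abcdef123456789".toList
    · by_cases hk : k ≤ 1
      · rw [pvCollect, pvCollect, if_pos hc, if_pos hc, if_pos hk, if_pos hk]
        rfl
      · rw [pvCollect, pvCollect, if_pos hc, if_pos hc, if_neg hk, if_neg hk]
        simp [ih]
    · rw [pvCollect, pvCollect, if_neg hc, if_neg hc, ih]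

-- folding shifted indices over a cons leaves the head alone
theorem pvFold_shift (f : Char → Char) (d : Char) (idxs : List Nat) :
    ∀ (y x : Char) (t acc : List Char),
      (idxs.map (· + 1)).foldl (fun out j => out.set j (f ((y :: t).getD j d))) (x :: acc)
        = x :: idxs.foldl (fun out j => out.set j (f (t.getD j d))) acc := by
  induction idxs with
  | nil => intro y x t acc; rfl
  | cons j rest ih =>
    intro y x t acc
    simp only [List.map_cons, List.foldl_cons, List.getD_cons_succ, List.set_cons_succ]
    exact ih y x t (acc.set j (f (t.getD j d)))

theorem pvB_go (t : List Char) :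
    ∀ k, 1 ≤ k →
      (pvCollect t 0 k).foldl
        (fun out i => out.set i (pvHexChar (pvHexVal (t.getD i ' ') - 1))) t = pvGo k t := by
  induction t with
  | nil => intro k _; rfl
  | cons c rest ih =>
    intro k hk
    by_cases hc : c ∈ "abcdef123456789".toList
    · by_cases h1 : k ≤ 1
      · have hk1 : k = 1 := by omega
        subst hk1
        rw [pvCollect, if_pos hc, if_pos (le_refl 1),
          pvGo_cons_pos hc Nat.one_pos, pvGo_zero]
        rfl
      · rw [pvCollect, if_pos hc, if_neg h1]
        have h01 : (0 : Nat) + 1 = 1 := rfl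
        rw [← h01, pvCollect_shift]
        simp only [List.foldl_cons, List.getD_cons_zero, List.set_cons_zero]
        rw [pvFold_shift (fun x => pvHexChar (pvHexVal x - 1)) ' ' _ c
          (pvHexChar (pvHexVal c - 1)) rest rest,
          ih (k - 1) (by omega), pvGo_cons_pos hc (by omega)]
    · rw [pvCollect, if_neg hc]
      have h01 : (0 : Nat) + 1 = 1 := rfl
      rw [← h01, pvCollect_shift,
        pvFold_shift (fun x => pvHexChar (pvHexVal x - 1)) ' ' _ c c rest rest,
        ih k hk, pvGo_cons_neg hc]

-- ===== VERDICT (by name: the statement is the Claim_ definition above) =====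
theorem Lower_MAC_spec : Claim_equal_Lower_MAC := by
  intro mac _
  show Lower_MAC mac = Lower_MAC_alt mac
  have hA : pvLoopA mac.toList [] 0 false = pvGo 3 mac.toList := by
    have := pvLoopA_false mac.toList 3 [] (by norm_num) (le_refl 3)
    simpa using this
  simp only [Lower_MAC, Lower_MAC_alt]
  rw [hA, pvB_go mac.toList 3 (by norm_num)]
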